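-- pv_equiv track=rewrite | github.com/Zignigit/Zignigit | MyModule.py | find_motif_noncross
-- ===== SOURCE A (Python) =====
-- def find_motif_noncross(motif, sec):
--     search_index = 0
--     res = []
--     while search_index != -1:
--         search_index = sec.find(motif, search_index)
--         #res.append(search_index)
--         res.append([search_index,(search_index + len(motif) - 1)])
--         if search_index != -1:
--             search_index += len(motif)
--     return res[:-1]
-- ===== SOURCE B (Python) =====
-- def find_motif_noncross(motif, sec):
--     # Stage 1: enumerate every (possibly overlapping) occurrence start of motif in sec.
--     m = len(motif)
--     starts = [i for i in range(len(sec) - m + 1) if sec[i:i+m] == motif]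
--     # Stage 2: greedy interval-scheduling filter — keep a start only if it begins
--     # at or after the end of the previously kept occurrence.
--     res = []
--     free = 0
--     for s in starts:
--         if s >= free:
--             res.append([s, s + m - 1])
--             free = s + m
--     return res
-- ===== Notes on version B (the rewrite author's own statement) =====
-- stated objective: alternative
-- what changed: Replaces A's single find-and-jump loop (with sentinel append and res[:-1] trim) by two staged passes: first enumerate ALL (including overlapping) occurrence start positions via slice comparison, then a separate greedy interval-scheduling filter that keeps an occurrence only if it starts at or after the end of the previously kept one; correct because greedy leftmost selection over the sorted occurrence list picks exactly the starts A's jump loop visits.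
import Mathlib
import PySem

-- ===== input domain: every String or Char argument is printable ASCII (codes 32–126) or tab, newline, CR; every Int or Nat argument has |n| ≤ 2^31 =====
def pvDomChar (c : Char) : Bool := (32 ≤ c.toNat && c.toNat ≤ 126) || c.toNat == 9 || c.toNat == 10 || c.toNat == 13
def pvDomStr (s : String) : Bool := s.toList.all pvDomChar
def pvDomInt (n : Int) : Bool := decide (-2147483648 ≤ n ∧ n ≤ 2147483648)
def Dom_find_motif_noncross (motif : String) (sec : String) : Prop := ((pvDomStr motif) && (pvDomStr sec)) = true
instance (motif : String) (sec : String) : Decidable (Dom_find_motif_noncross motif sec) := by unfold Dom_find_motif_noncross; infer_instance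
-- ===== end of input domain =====

-- B replaces A's repeated str.find jump loop (with its sentinel append and res[:-1] trim) by
-- two staged passes: enumerate all (overlapping) occurrence starts, then a greedy
-- interval-scheduling filter (objective: alternative; return-value equivalence only).


-- ===== PORT A =====
-- A's while loop; fuel only makes the recursion total (sec.length + 2 iterations always
-- suffice when motif ≠ "", proved below; with motif = "" Python loops forever — excluded by Pre_).
def pvALoop (motif sec : List Char) (searchIndex : Int) (res : List (List Int)) (fuel : Nat) : List (List Int) :=
  match fuel with
  | 0 => res
  | Nat.succ fuel =>
    if searchIndex = -1 then res
    else
      let si := PySem.Chars.findFrom sec motif searchIndex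
      let res' := res ++ [[si, si + (motif.length : Int) - 1]]
      pvALoop motif sec (if si ≠ -1 then si + (motif.length : Int) else si) res' fuel

def find_motif_noncross (motif : String) (sec : String) : List (List Int) :=
  PySem.List.slice (pvALoop motif.toList sec.toList 0 [] (sec.toList.length + 2)) none (some (-1))

-- ===== PORT B =====
-- B's loop body 'if s >= free: append and advance free' for the stage-2 for-loop.
def pvGreedyStep (m : Nat) (st : List (List Int) × Nat) (s : Nat) : List (List Int) × Nat :=
  if st.2 ≤ s then (st.1 ++ [[(s : Int), (s : Int) + (m : Int) - 1]], s + m) else st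

-- Stage 1: 'range(len(sec) - m + 1)' ported as List.range (n + 1 - m): Nat truncation equals
-- Python's empty range on a negative argument; slice sec[i:i+m] with 0 ≤ i is exactly
-- List.take m (List.drop i ·) (Python clamps past the end, as take does).
-- Stage 2: the for-loop over starts with state (res, free) is the foldl of pvGreedyStep.
def find_motif_noncross_alt (motif : String) (sec : String) : List (List Int) :=
  let m := motif.toList.length
  let starts := (List.range (sec.toList.length + 1 - m)).filter
      (fun i => decide (List.take m (List.drop i sec.toList) = motif.toList))
  (starts.foldl (pvGreedyStep m) ([], 0)).1

-- ===== PRECONDITION & SPEC =====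
-- Pre_ excludes only motif = "", on which Python A loops forever and returns nothing.
def Pre_find_motif_noncross (motif : String) (sec : String) : Prop := motif.toList ≠ []
instance (motif : String) (sec : String) : Decidable (Pre_find_motif_noncross motif sec) := by unfold Pre_find_motif_noncross; infer_instance

def pvWitness_find_motif_noncross : String × String := ("ab", "cabcabx")

def Spec_find_motif_noncross (motif : String) (sec : String) (out : List (List Int)) : Prop := out = find_motif_noncross_alt motif sec
instance (motif : String) (sec : String) (out : List (List Int)) : Decidable (Spec_find_motif_noncross motif sec out) := by unfold Spec_find_motif_noncross; infer_instance

-- ===== CLAIM (what is proved, stated in full; the proofs are below) =====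
def Claim_equal_find_motif_noncross : Prop := ∀ (motif : String) (sec : String), Dom_find_motif_noncross motif sec → Pre_find_motif_noncross motif sec → Spec_find_motif_noncross motif sec (find_motif_noncross motif sec)

-- ===== LEMMAS AND PROOFS =====

-- Proof-side intermediate: a position-by-position sliding scan; A's trimmed loop equals it
-- (pv_main below), and it equals B's staged enumerate-then-filter (pvScan_eq_greedy below).
def pvBLoop (motif sec : List Char) (i : Nat) (res : List (List Int)) (fuel : Nat) : List (List Int) :=
  match fuel with
  | 0 => res
  | Nat.succ fuel =>
    if i + motif.length ≤ sec.length then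
      if motif.isPrefixOf (sec.drop i) then
        pvBLoop motif sec (i + motif.length) (res ++ [[(i : Int), (i : Int) + (motif.length : Int) - 1]]) fuel
      else
        pvBLoop motif sec (i + 1) res fuel
    else res

-- If motif occurs nowhere at or after position i, the scan appends nothing.
lemma pvBLoop_no_match (motif sec : List Char) :
    ∀ (fuel : Nat) (i : Nat) (res : List (List Int)),
      ¬ motif <:+: sec.drop i → pvBLoop motif sec i res fuel = res := by
  intro fuel
  induction fuel with
  | zero => intro i res _; rfl
  | succ fuel ih =>
    intro i res h
    simp only [pvBLoop]
    split
    · have hpre : motif.isPrefixOf (sec.drop i) = false := by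
        by_contra hb
        have : motif.isPrefixOf (sec.drop i) = true := by
          cases hx : motif.isPrefixOf (sec.drop i) <;> simp_all
        exact h ((List.isPrefixOf_iff_prefix.mp this).isInfix)
      rw [hpre]
      simp only [Bool.false_eq_true, if_false]
      refine ih (i + 1) res ?_
      intro hinf
      have hsuf : sec.drop (i + 1) <:+ sec.drop i := by
        have h1 := List.drop_suffix 1 (sec.drop i)
        rwa [List.drop_drop] at h1
      exact h (hinf.trans hsuf.isInfix)
    · rfl

-- Stepping the scan over a match-free stretch [i, i+d) leaves res unchanged, landing at i+d.
lemma pvBLoop_skip (motif sec : List Char) :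
    ∀ (d i fuel : Nat) (res : List (List Int)),
      d ≤ fuel →
      (∀ k, i ≤ k → k < i + d → ¬ motif <+: sec.drop k) →
      i + d + motif.length ≤ sec.length →
      pvBLoop motif sec i res fuel = pvBLoop motif sec (i + d) res (fuel - d) := by
  intro d
  induction d with
  | zero => intro i fuel res _ _ _; simp
  | succ d ih =>
    intro i fuel res hfuel hfree hlen
    obtain ⟨fuel', rfl⟩ : ∃ k, fuel = k + 1 := ⟨fuel - 1, by omega⟩
    simp only [pvBLoop]
    have hguard : i + motif.length ≤ sec.length := by omega
    rw [if_pos hguard]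
    have hpre : motif.isPrefixOf (sec.drop i) = false := by
      by_contra hb
      have : motif.isPrefixOf (sec.drop i) = true := by
        cases hx : motif.isPrefixOf (sec.drop i) <;> simp_all
      exact hfree i le_rfl (by omega) (List.isPrefixOf_iff_prefix.mp this)
    rw [hpre]
    simp only [Bool.false_eq_true, if_false]
    have := ih (i + 1) fuel' res (by omega)
      (fun k hk1 hk2 => hfree k (by omega) (by omega)) (by omega)
    rw [this]
    congr 1 <;> omega

-- A's loop returns res as soon as the search index is -1.
lemma pvALoop_neg_one (motif sec : List Char) (res : List (List Int)) (fuel : Nat) :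
    pvALoop motif sec (-1) res fuel = res := by
  cases fuel with
  | zero => rfl
  | succ fuel => simp [pvALoop]

-- Main invariant: from any position i, A's trimmed loop equals the sliding scan.
lemma pv_main (motif sec : List Char) (hm : motif.length ≠ 0) :
    ∀ (fb i : Nat), i ≤ sec.length → ∀ (res : List (List Int)) (fa : Nat),
      sec.length - i + 2 ≤ fa → sec.length - i + 1 ≤ fb →
      (pvALoop motif sec (i : Int) res fa).dropLast = pvBLoop motif sec i res fb := by
  intro fb
  induction fb using Nat.strong_induction_on with
  | _ fb ih =>
    intro i hi res fa hfa hfb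
    obtain ⟨fa', rfl⟩ : ∃ k, fa = k + 1 := ⟨fa - 1, by omega⟩
    simp only [pvALoop]
    rw [if_neg (by omega : ¬ ((i : Int) = -1))]
    by_cases hneg : PySem.Chars.findFrom sec motif (i : Int) = -1
    · rw [if_neg (not_not_intro hneg), hneg, pvALoop_neg_one, List.dropLast_concat]
      exact (pvBLoop_no_match motif sec fb i res
        ((PySem.Chars.findFrom_natCast_eq_neg_one_iff sec motif i hi).mp hneg)).symm
    · obtain ⟨hle, hpre, hmin⟩ := PySem.Chars.findFrom_natCast_spec sec motif i hi hneg
      set si := PySem.Chars.findFrom sec motif (i : Int) with hsi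
      have h0 : 0 ≤ si := le_trans (by omega) hle
      set j := si.toNat with hj
      have hsij : si = (j : Int) := (Int.toNat_of_nonneg h0).symm
      have hij : i ≤ j := by omega
      have hjm : j + motif.length ≤ sec.length := by
        have := hpre.length_le
        simp [List.length_drop] at this
        omega
      rw [if_pos hneg]
      rw [pvBLoop_skip motif sec (j - i) i fb res (by omega)
        (fun k hk1 hk2 => hmin k hk1 (by omega)) (by omega)]
      have hjj : i + (j - i) = j := by omega
      rw [hjj]
      obtain ⟨fb', hfb'⟩ : ∃ k, fb - (j - i) = k + 1 := ⟨fb - (j - i) - 1, by omega⟩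
      rw [hfb']
      simp only [pvBLoop]
      rw [if_pos hjm, if_pos (List.isPrefixOf_iff_prefix.mpr hpre)]
      rw [hsij]
      have hcast : ((j : Int) + (motif.length : Int)) = ((j + motif.length : Nat) : Int) := by
        push_cast; ring
      rw [hcast]
      exact ih fb' (by omega) (j + motif.length) (by omega)
        (res ++ [[(j : Int), (j : Int) + (motif.length : Int) - 1]]) fa' (by omega) (by omega)

-- Peeling one position off a filtered index interval.
lemma pv_filter_range'_step (p : Nat → Bool) (K i : Nat) (hi : i < K) :
    (List.range' i (K - i)).filter p =
      (if p i then [i] else []) ++ (List.range' (i + 1) (K - (i + 1))).filter p := by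
  have h : K - i = (K - (i + 1)) + 1 := by omega
  rw [h, List.range'_succ, List.filter_cons]
  cases hp : p i <;> simp

-- The greedy fold ignores every start below the current free position.
lemma pv_greedy_skip (p : Nat → Bool) (m K : Nat) :
    ∀ (d j : Nat) (res : List (List Int)) (f : Nat), j + d ≤ f →
      List.foldl (pvGreedyStep m) (res, f) ((List.range' j (K - j)).filter p) =
      List.foldl (pvGreedyStep m) (res, f) ((List.range' (j + d) (K - (j + d))).filter p) := by
  intro d
  induction d with
  | zero => intro j res f _; simp
  | succ d ih =>
    intro j res f hf
    by_cases hj : j < K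
    · rw [pv_filter_range'_step p K j hj]
      have hstep : ∀ l, List.foldl (pvGreedyStep m) (res, f) ((if p j then [j] else []) ++ l) =
          List.foldl (pvGreedyStep m) (res, f) l := by
        intro l
        cases hp : p j
        · simp
        · have hid : pvGreedyStep m (res, f) j = (res, f) := by
            simp [pvGreedyStep, if_neg (by omega : ¬ f ≤ j)]
          simp [hid]
      rw [hstep]
      have h1 : (j + 1) + d = j + (d + 1) := by omega
      have := ih (j + 1) res f (by omega)
      rwa [h1] at this
    · have h0 : K - j = 0 := by omega
      have h1 : K - (j + (d + 1)) = 0 := by omega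
      rw [h0, h1]
      simp

-- Any enumerated occurrence start s satisfies s + m ≤ n (for nonempty motif).
lemma pv_start_bound (motif sec : List Char) (hm : motif.length ≠ 0) (s : Nat)
    (hp : List.take motif.length (List.drop s sec) = motif) :
    s + motif.length ≤ sec.length := by
  have hlen := congrArg List.length hp
  simp [List.length_take, List.length_drop] at hlen
  omega

-- Bridge: the sliding scan from position i equals the greedy fold over the filtered
-- occurrence starts in [i, K), for any free position f ≤ i.
lemma pvScan_eq_greedy (motif sec : List Char) (hm : motif.length ≠ 0) :
    ∀ (fuel i f : Nat) (res : List (List Int)), f ≤ i → sec.length + 1 ≤ fuel + i →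
      pvBLoop motif sec i res fuel =
      (List.foldl (pvGreedyStep motif.length) (res, f)
        ((List.range' i ((sec.length + 1 - motif.length) - i)).filter
          (fun s => decide (List.take motif.length (List.drop s sec) = motif)))).1 := by
  intro fuel
  induction fuel with
  | zero =>
    intro i f res _ hfi
    have h0 : (sec.length + 1 - motif.length) - i = 0 := by omega
    rw [h0]
    simp [pvBLoop]
  | succ fuel ih =>
    intro i f res hf hfi
    simp only [pvBLoop]
    by_cases hg : i + motif.length ≤ sec.length
    · have hiK : i < sec.length + 1 - motif.length := by omega
      by_cases hpre : motif.isPrefixOf (sec.drop i)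
      · have htake : List.take motif.length (List.drop i sec) = motif := by
          have := List.isPrefixOf_iff_prefix.mp hpre
          exact (List.prefix_iff_eq_take.mp this).symm
        rw [if_pos hg, if_pos hpre,
          pv_filter_range'_step _ _ i hiK]
        rw [if_pos (by simp [htake])]
        simp only [List.singleton_append, List.foldl_cons]
        have hstep : pvGreedyStep motif.length (res, f) i =
            (res ++ [[(i : Int), (i : Int) + (motif.length : Int) - 1]], i + motif.length) := by
          simp [pvGreedyStep, if_pos hf]
        rw [hstep]
        rw [pv_greedy_skip _ motif.length _ (motif.length - 1) (i + 1) _ (i + motif.length)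
          (by omega)]
        have harith : (i + 1) + (motif.length - 1) = i + motif.length := by omega
        rw [harith]
        exact ih (i + motif.length) (i + motif.length) _ le_rfl (by omega)
      · have htake : ¬ List.take motif.length (List.drop i sec) = motif := by
          intro h
          exact hpre (List.isPrefixOf_iff_prefix.mpr
            (List.prefix_iff_eq_take.mpr h.symm))
        rw [if_pos hg, if_neg hpre, pv_filter_range'_step _ _ i hiK]
        rw [if_neg (by simp [htake])]
        simp only [List.nil_append]
        exact ih (i + 1) f res (by omega) (by omega)
    · rw [if_neg hg]
      have hnil : (List.range' i ((sec.length + 1 - motif.length) - i)).filter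
          (fun s => decide (List.take motif.length (List.drop s sec) = motif)) = [] := by
        rw [List.filter_eq_nil_iff]
        intro s hs
        simp only [decide_eq_true_eq]
        intro hp
        have := pv_start_bound motif sec hm s hp
        have hsi : i ≤ s := (List.mem_range'_1.mp hs).1
        omega
      rw [hnil]
      rfl

-- B's staged implementation equals the sliding scan started at 0.
lemma pvAlt_eq_scan (motif sec : String) (hm : motif.toList.length ≠ 0) :
    find_motif_noncross_alt motif sec =
      pvBLoop motif.toList sec.toList 0 [] (sec.toList.length + 1) := by
  show (List.foldl (pvGreedyStep motif.toList.length) ([], 0)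
      ((List.range (sec.toList.length + 1 - motif.toList.length)).filter
        (fun i => decide (List.take motif.toList.length (List.drop i sec.toList) = motif.toList)))).1 = _
  rw [List.range_eq_range']
  have := pvScan_eq_greedy motif.toList sec.toList hm (sec.toList.length + 1) 0 0 []
    le_rfl (by omega)
  simp only [Nat.sub_zero] at this
  exact this.symm

-- ===== VERDICT (by name: the statement is the Claim_ definition above) =====
theorem find_motif_noncross_spec : Claim_equal_find_motif_noncross := by
  intro motif sec _ hpre
  unfold Spec_find_motif_noncross find_motif_noncross
  have hm : motif.toList.length ≠ 0 := by
    intro h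
    exact hpre (List.length_eq_zero_iff.mp h)
  rw [PySem.List.slice_to_neg_one, pvAlt_eq_scan motif sec hm]
  have := pv_main motif.toList sec.toList hm (sec.toList.length + 1) 0 (by omega) []
    (sec.toList.length + 2) (by omega) (by omega)
  simpa using this
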